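-- pv_equiv track=rewrite | github.com/sherman617/crypto-challenges | challenge11.py | detect_ecb
-- ===== SOURCE A (Python) =====
-- def detect_ecb(ct):
--     blocksize = 16
--     match = False
--     numblocks = len(ct) // blocksize
--     for i in range(numblocks):
--         for j in range(i+1, numblocks):
--             if ct[i*blocksize:(i+1)*blocksize] == \
--                ct[j*blocksize:(j+1)*blocksize]:
--                 match = True
--     return match
-- ===== SOURCE B (Python) =====
-- def detect_ecb(ct):
--     blocksize = 16
--     numblocks = len(ct) // blocksize
--     blocks = sorted(ct[k * blocksize:(k + 1) * blocksize] for k in range(numblocks))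
--     return any(x == y for x, y in zip(blocks, blocks[1:]))
-- ===== Notes on version B (the rewrite author's own statement) =====
-- stated objective: faster
-- what changed: Replaces the all-pairs O(b^2) block comparison with sorting the 16-byte blocks and one linear scan comparing adjacent blocks.
import Mathlib
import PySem

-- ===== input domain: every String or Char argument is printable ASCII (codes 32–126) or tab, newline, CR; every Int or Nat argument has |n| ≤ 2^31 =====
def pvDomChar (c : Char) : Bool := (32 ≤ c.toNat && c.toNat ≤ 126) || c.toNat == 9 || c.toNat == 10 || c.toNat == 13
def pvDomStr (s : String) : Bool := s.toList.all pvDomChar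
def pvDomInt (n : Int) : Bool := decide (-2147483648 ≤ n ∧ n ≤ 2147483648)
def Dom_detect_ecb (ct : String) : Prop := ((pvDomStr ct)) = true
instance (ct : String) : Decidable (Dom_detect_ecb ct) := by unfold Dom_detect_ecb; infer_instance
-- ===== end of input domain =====

-- B replaces A's all-pairs block comparison by sorting the 16-byte blocks and one adjacent-compare pass (faster).

-- ===== PORT A =====
def detect_ecb (ct : String) : Bool :=
  let blocksize : Int := 16
  let cs := ct.toList
  let numblocks := PySem.Int.floordiv (cs.length : Int) blocksize
  (PySem.List.pyRange 0 numblocks 1).foldl (fun m i =>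
    (PySem.List.pyRange (i + 1) numblocks 1).foldl (fun m j =>
      if PySem.List.slice cs (some (i * blocksize)) (some ((i + 1) * blocksize)) =
         PySem.List.slice cs (some (j * blocksize)) (some ((j + 1) * blocksize)) then true else m) m)
    false

-- ===== PORT B =====
def detect_ecb_alt (ct : String) : Bool :=
  let blocksize : Int := 16
  let cs := ct.toList
  let numblocks := PySem.Int.floordiv (cs.length : Int) blocksize
  let blocks := PySem.List.sorted ((PySem.List.pyRange 0 numblocks 1).map
      (fun k => PySem.List.slice cs (some (k * blocksize)) (some ((k + 1) * blocksize))))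
      (fun x => x) false
  (blocks.zip (PySem.List.slice blocks (some 1) none)).any (fun p => p.1 == p.2)

-- ===== PRECONDITION & SPEC =====
def Spec_detect_ecb (ct : String) (out : Bool) : Prop := out = detect_ecb_alt ct
instance (ct : String) (out : Bool) : Decidable (Spec_detect_ecb ct out) := by unfold Spec_detect_ecb; infer_instance

-- ===== CLAIM (what is proved, stated in full; the proofs are below) =====
def Claim_equal_detect_ecb : Prop := ∀ (ct : String), Dom_detect_ecb ct → Spec_detect_ecb ct (detect_ecb ct)

-- ===== LEMMAS AND PROOFS =====

-- Python's 'if p x: m = True' loop is 'm or any p'.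
theorem pv_foldl_or {α : Type} (p : α → Bool) :
    ∀ (xs : List α) (m : Bool), xs.foldl (fun m x => m || p x) m = (m || xs.any p)
  | [], m => by simp
  | x :: xs, m => by
    simp [List.foldl_cons, pv_foldl_or p xs, Bool.or_assoc]

-- adjacent-equal scan on a ≤-sorted list detects exactly a duplicate in the list
theorem pv_adjDup {α : Type} [LinearOrder α] [BEq α] [LawfulBEq α] :
    ∀ (l : List α), l.Pairwise (· ≤ ·) →
      ((l.zip l.tail).any (fun p => p.1 == p.2) = true ↔ ¬ l.Nodup)
  | [], _ => by simp
  | [a], _ => by simp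
  | a :: b :: t, h => by
    have ih := pv_adjDup (b :: t) h.tail
    simp only [List.tail_cons, List.zip_cons_cons, List.any_cons, Bool.or_eq_true, beq_iff_eq] at ih ⊢
    by_cases hab : a = b
    · subst hab
      simp [List.nodup_cons]
    · have hnotmem : List.Nodup (b :: t) → a ∉ b :: t := by
        intro hnd hmem
        rcases List.mem_cons.mp hmem with h1 | h2
        · exact hab h1
        · have hab' : a ≤ b := (List.pairwise_cons.mp h).1 b (by simp)
          have hba : b ≤ a := (List.pairwise_cons.mp h.tail).1 a h2
          exact hab (le_antisymm hab' hba)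
      constructor
      · rintro (h1 | h2)
        · exact absurd h1 hab
        · intro hnd
          exact (ih.mp h2) (List.nodup_cons.mp hnd).2
      · intro hnd
        right
        apply ih.mpr
        intro hnd2
        exact hnd (List.nodup_cons.mpr ⟨hnotmem hnd2, hnd2⟩)

-- the two ports agree on the shared character list
theorem pv_main (cs : List Char) :
    (let blocksize : Int := 16
     let numblocks := PySem.Int.floordiv (cs.length : Int) blocksize
     (PySem.List.pyRange 0 numblocks 1).foldl (fun m i =>
       (PySem.List.pyRange (i + 1) numblocks 1).foldl (fun m j =>
         if PySem.List.slice cs (some (i * blocksize)) (some ((i + 1) * blocksize)) =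
            PySem.List.slice cs (some (j * blocksize)) (some ((j + 1) * blocksize)) then true else m) m)
       false) =
    (let blocksize : Int := 16
     let numblocks := PySem.Int.floordiv (cs.length : Int) blocksize
     let blocks := PySem.List.sorted ((PySem.List.pyRange 0 numblocks 1).map
         (fun k => PySem.List.slice cs (some (k * blocksize)) (some ((k + 1) * blocksize))))
         (fun x => x) false
     (blocks.zip (PySem.List.slice blocks (some 1) none)).any (fun p => p.1 == p.2)) := by
  dsimp only
  set blk : Int → List Char := fun k => PySem.List.slice cs (some (k * 16)) (some ((k + 1) * 16)) with hblk
  set n : Int := PySem.Int.floordiv (cs.length : Int) 16 with hn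
  have hn0 : 0 ≤ n := by
    have h16 : PySem.Int.floordiv (cs.length : Int) 16 = ((cs.length / 16 : Nat) : Int) := by
      exact_mod_cast PySem.Int.floordiv_natCast cs.length 16
    rw [hn, h16]; positivity
  set bs : List (List Char) := (PySem.List.pyRange 0 n 1).map blk with hbs
  -- A side
  have hif : ∀ i : Int, (fun (m : Bool) j => if blk i = blk j then true else m)
      = (fun (m : Bool) j => m || (blk i == blk j)) := by
    intro i; funext m j; by_cases h : blk i = blk j <;> simp [h]
  have hA : ((PySem.List.pyRange 0 n 1).foldl (fun m i =>
       (PySem.List.pyRange (i + 1) n 1).foldl (fun m j =>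
         if blk i = blk j then true else m) m) false)
      = (PySem.List.pyRange 0 n 1).any (fun i =>
          (PySem.List.pyRange (i + 1) n 1).any (fun j => blk i == blk j)) := by
    have : (fun (m : Bool) i => (PySem.List.pyRange (i + 1) n 1).foldl (fun m j =>
         if blk i = blk j then true else m) m)
        = (fun (m : Bool) i => m || (PySem.List.pyRange (i + 1) n 1).any (fun j => blk i == blk j)) := by
      funext m i
      rw [hif i, pv_foldl_or]
    rw [this, pv_foldl_or, Bool.false_or]
  rw [hA]
  -- characterize A as a duplicate in bs
  have hAiff : ((PySem.List.pyRange 0 n 1).any (fun i =>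
          (PySem.List.pyRange (i + 1) n 1).any (fun j => blk i == blk j)) = true) ↔ ¬ bs.Nodup := by
    rw [List.any_eq_true]
    constructor
    · rintro ⟨i, hi, hinner⟩
      rw [List.any_eq_true] at hinner
      obtain ⟨j, hj, hEq⟩ := hinner
      rw [PySem.List.mem_pyRange_one] at hi hj
      rw [beq_iff_eq] at hEq
      rw [List.Nodup, List.pairwise_iff_getElem]
      push Not
      refine ⟨i.toNat, j.toNat, ?_, ?_, ?_, ?_⟩
      · simp [hbs, PySem.List.length_pyRange_one]; omega
      · simp [hbs, PySem.List.length_pyRange_one]; omega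
      · omega
      · simp only [hbs, List.getElem_map, PySem.List.getElem_pyRange_one, zero_add]
        rwa [Int.toNat_of_nonneg (by omega), Int.toNat_of_nonneg (by omega)]
    · intro hnd
      rw [List.Nodup, List.pairwise_iff_getElem] at hnd
      push Not at hnd
      obtain ⟨i, j, hi, hj, hij, hEq⟩ := hnd
      have hlen : bs.length = n.toNat := by
        simp [hbs, PySem.List.length_pyRange_one]
      simp only [hbs, List.getElem_map, PySem.List.getElem_pyRange_one, zero_add] at hEq
      refine ⟨(i : Int), ?_, ?_⟩
      · rw [PySem.List.mem_pyRange_one]; omega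
      · rw [List.any_eq_true]
        exact ⟨(j : Int), by rw [PySem.List.mem_pyRange_one]; omega, by rw [beq_iff_eq]; exact_mod_cast hEq⟩
  rw [Bool.eq_iff_iff, hAiff]
  -- B side: align the DecidableLT instance with the LinearOrder one, then use the sorted lemmas
  have hinst : (fun (a b : List Char) => a.decidableLT b) = (LinearOrder.toDecidableLT : DecidableLT (List Char)) := by
    funext a b; exact Subsingleton.elim _ _
  rw [show (@PySem.List.sorted (List Char) (List Char) List.instLT (fun a b => a.decidableLT b) bs (fun x => x) false)
      = @PySem.List.sorted (List Char) (List Char) List.instLT LinearOrder.toDecidableLT bs (fun x => x) false from by rw [hinst]]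
  set blocks := @PySem.List.sorted (List Char) (List Char) List.instLT LinearOrder.toDecidableLT bs (fun x => x) false with hblocks
  have hperm : blocks.Perm bs := @PySem.List.sorted_perm (List Char) (List Char) List.instLT LinearOrder.toDecidableLT bs (fun x => x) false
  have hpair : blocks.Pairwise (· ≤ ·) := @PySem.List.sorted_pairwise (List Char) (List Char) _ bs (fun x => x)
  rw [PySem.List.slice_from_one]
  exact ((@pv_adjDup (List Char) _ List.instBEq _ blocks hpair).trans (not_congr hperm.nodup_iff)).symm
-- ===== VERDICT (by name: the statement is the Claim_ definition above) =====
theorem detect_ecb_spec : Claim_equal_detect_ecb := by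
  intro ct _
  unfold Spec_detect_ecb detect_ecb detect_ecb_alt
  exact pv_main ct.toList
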